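-- pv_equiv track=rewrite | github.com/kesava1234567890/slot-c-python | 2.sumsquare.py | sumsquare
-- ===== SOURCE A (Python) =====
-- def sumsquare(a):
--         odd=0
--         even=0
--         for i in a:
--             if i%2==0:
--                 even=even+i**2
--             else :
--                 odd=odd+i**2
--         a=[odd,even]
--         return(a)
-- ===== SOURCE B (Python) =====
-- def sumsquare(a):
--     total = sum(i * i for i in a)
--     odd = sum((i % 2) * i * i for i in a)
--     return [odd, total - odd]
-- ===== Notes on version B (the rewrite author's own statement) =====
-- stated objective: alternative
-- what changed: Instead of classifying each element with a branch into two accumulators, B computes the total sum of squares and a branch-free parity-weighted sum (i%2)*i*i giving the odd part, and obtains the even part by subtraction total - odd.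
import Mathlib
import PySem

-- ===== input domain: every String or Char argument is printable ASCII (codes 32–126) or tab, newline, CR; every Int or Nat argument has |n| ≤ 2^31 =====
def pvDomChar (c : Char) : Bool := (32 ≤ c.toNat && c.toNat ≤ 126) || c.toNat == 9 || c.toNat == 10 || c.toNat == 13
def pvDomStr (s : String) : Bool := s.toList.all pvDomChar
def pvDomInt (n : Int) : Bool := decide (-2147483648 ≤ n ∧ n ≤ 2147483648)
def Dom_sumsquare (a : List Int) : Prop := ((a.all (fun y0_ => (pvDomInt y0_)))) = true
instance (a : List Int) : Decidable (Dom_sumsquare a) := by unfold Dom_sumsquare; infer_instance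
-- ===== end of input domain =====

-- B avoids the per-element branch: it takes the total sum of squares and a parity-weighted
-- sum (i%2)*i*i for the odd part, recovering the even part by subtraction (alternative, same cost).

-- ===== PORT A =====
-- single fold carrying both accumulators (odd, even), branching on parity as in A's loop
def sumsquare (a : List Int) : List Int :=
  let s := a.foldl (fun (st : Int × Int) i =>
    if PySem.Int.mod i 2 = 0 then (st.1, st.2 + i ^ 2) else (st.1 + i ^ 2, st.2)) (0, 0)
  [s.1, s.2]

-- ===== PORT B =====
def sumsquare_alt (a : List Int) : List Int :=
  let total := (a.map (fun i => i * i)).sum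
  let odd := (a.map (fun i => PySem.Int.mod i 2 * i * i)).sum
  [odd, total - odd]

-- ===== PRECONDITION & SPEC =====
def Spec_sumsquare (a : List Int) (out : List Int) : Prop := out = sumsquare_alt a
instance (a : List Int) (out : List Int) : Decidable (Spec_sumsquare a out) := by unfold Spec_sumsquare; infer_instance

-- ===== CLAIM =====
def Claim_equal_sumsquare : Prop := ∀ (a : List Int), Dom_sumsquare a → Spec_sumsquare a (sumsquare a)

-- ===== LEMMAS AND PROOFS =====
-- loop invariant: A's fold starting from (o, e) adds (weighted odd sum, total − weighted odd sum)
theorem sumsquare_fold_inv (a : List Int) (o e : Int) :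
    a.foldl (fun (st : Int × Int) i =>
      if PySem.Int.mod i 2 = 0 then (st.1, st.2 + i ^ 2) else (st.1 + i ^ 2, st.2)) (o, e)
    = (o + (a.map (fun i => PySem.Int.mod i 2 * i * i)).sum,
       e + ((a.map (fun i => i * i)).sum - (a.map (fun i => PySem.Int.mod i 2 * i * i)).sum)) := by
  induction a generalizing o e with
  | nil => simp
  | cons x xs ih =>
    simp only [List.foldl_cons, List.map_cons, List.sum_cons]
    rcases PySem.Int.mod_two_eq x with h | h
    · simp only [h, if_true, ih]
      ring_nf
    · have hne : ¬ PySem.Int.mod x 2 = 0 := by rw [h]; decide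
      rw [if_neg hne]
      simp only [h, ih]
      ring_nf

-- ===== VERDICT =====
theorem sumsquare_spec : Claim_equal_sumsquare := by
  intro a _
  unfold Spec_sumsquare sumsquare sumsquare_alt
  simp only [sumsquare_fold_inv, zero_add]
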